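-- pv_equiv track=rewrite | github.com/andresdh/CodeFights | Core/04_Loop Tunnel/31_increaseNumberRoundness.py | increaseNumberRoundness
-- ===== SOURCE A (Python) =====
-- def increaseNumberRoundness(n):
--     flg = False
--     number = str(n)[::-1]
--     i_c = ceros = number.count("0",0,len(number))
--     i_nc = no_ceros = len(number)-ceros
--     if ceros == 0:
--         flg = False
--     else:
--         for x in enumerate(number):
--             if x[1] == "0":
--                 ceros -= 1
--             else:
--                 no_ceros -= 1
--             if ceros == 0 and no_ceros > 0:
--                 break
--             elif ceros > 0 and no_ceros < i_nc:
--                 flg = True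
--                 break
--     return flg
-- ===== SOURCE B (Python) =====
-- def increaseNumberRoundness(n):
--     return "0" in str(n).rstrip("0")
-- ===== Notes on version B (the rewrite author's own statement) =====
-- stated objective: simpler
-- what changed: A counts zeros, reverses the string and runs a counter loop with break logic; B strips the trailing run of '0' and tests membership of '0' in the remainder (one line).
import Mathlib
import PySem

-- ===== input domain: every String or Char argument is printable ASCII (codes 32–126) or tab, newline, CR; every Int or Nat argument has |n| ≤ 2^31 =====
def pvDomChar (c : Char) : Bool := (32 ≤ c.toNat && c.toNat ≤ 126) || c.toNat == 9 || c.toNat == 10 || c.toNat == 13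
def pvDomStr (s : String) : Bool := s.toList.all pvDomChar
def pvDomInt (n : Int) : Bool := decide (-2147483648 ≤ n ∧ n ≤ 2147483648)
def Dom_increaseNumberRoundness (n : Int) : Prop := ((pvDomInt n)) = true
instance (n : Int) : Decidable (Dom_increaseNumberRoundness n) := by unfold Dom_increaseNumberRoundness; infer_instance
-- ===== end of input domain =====

-- B replaces A's reverse-and-count loop with strip-trailing-zeros + membership test (objective: simpler).

-- ===== PORT A =====
-- the for-loop over enumerate(number) with its two break conditions; state = (ceros, no_ceros)
def pvLoopA (i_nc : Int) : List Char → Int → Int → Bool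
  | [], _, _ => false
  | c :: rest, ceros, no_ceros =>
    let ceros' := if c == '0' then ceros - 1 else ceros
    let no_ceros' := if c == '0' then no_ceros else no_ceros - 1
    if ceros' == 0 && no_ceros' > 0 then false          -- break with flg = False
    else if ceros' > 0 && no_ceros' < i_nc then true    -- flg = True; break
    else pvLoopA i_nc rest ceros' no_ceros'

def increaseNumberRoundness (n : Int) : Bool :=
  let number := (PySem.Int.toStr n).toList.reverse            -- str(n)[::-1]
  let ceros : Int := number.count '0'                         -- number.count("0",0,len(number))
  let no_ceros : Int := (number.length : Int) - ceros
  if ceros == 0 then false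
  else pvLoopA no_ceros number ceros no_ceros

-- ===== PORT B =====
def increaseNumberRoundness_alt (n : Int) : Bool :=
  -- str(n).rstrip("0"): drop the trailing run of '0' (exact, hand-ported: rstrip with a
  -- char set trims exactly the maximal trailing run of those chars); then "0" in result
  (((PySem.Int.toStr n).toList.reverse.dropWhile (· == '0')).reverse).contains '0' 

-- ===== PRECONDITION & SPEC =====
def Spec_increaseNumberRoundness (n : Int) (out : Bool) : Prop := out = increaseNumberRoundness_alt n
instance (n : Int) (out : Bool) : Decidable (Spec_increaseNumberRoundness n out) := by unfold Spec_increaseNumberRoundness; infer_instance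

-- ===== CLAIM (what is proved, stated in full; the proofs are below) =====
def Claim_equal_increaseNumberRoundness : Prop := ∀ (n : Int), Dom_increaseNumberRoundness n → Spec_increaseNumberRoundness n (increaseNumberRoundness n)

-- ===== LEMMAS AND PROOFS =====

lemma pv_contains_false (l : List Char) (h : l.count '0' = 0) :
    l.contains '0' = false := by
  have : ¬ '0' ∈ l := by
    intro hm
    have := List.count_pos_iff.mpr hm
    omega
  simpa [List.contains_eq_mem] using this

lemma pv_contains_true (l : List Char) (h : 0 < l.count '0') :
    l.contains '0' = true := by
  have : '0' ∈ l := List.count_pos_iff.mp h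
  simpa [List.contains_eq_mem] using this

lemma pv_contains_dropWhile_zero (l : List Char) (h : l.count '0' = 0) :
    (l.dropWhile (· == '0')).contains '0' = false := by
  apply pv_contains_false
  have hle := (List.dropWhile_sublist (l := l) (p := (· == '0'))).count_le '0'
  omega

-- once ceros has hit 0 and no '0' remains, the loop can only run to the end or break False
lemma pvLoopA_no_zeros (i_nc : Int) (l : List Char) (no_ceros : Int)
    (h : l.count '0' = 0) :
    pvLoopA i_nc l 0 no_ceros = false := by
  induction l generalizing no_ceros with
  | nil => rfl
  | cons c rest ih =>
    have hc : (c == '0') = false := by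
      by_contra hcc
      simp only [Bool.not_eq_false, beq_iff_eq] at hcc
      subst hcc
      simp at h
    have hr : rest.count '0' = 0 := by
      simp [List.count_cons, hc] at h
      exact h
    simp only [pvLoopA, hc, Bool.false_eq_true, if_false]
    split
    · rfl
    · split
      · rename_i h2
        simp at h2
      · exact ih _ hr

-- loop invariant: entering the loop with ceros = zeros of the remaining list and
-- no_ceros = i_nc = non-zeros of the remaining list computes dropWhile-then-contains
lemma pvLoopA_phase1 (l : List Char) (i_nc : Int)
    (h : i_nc = (l.length : Int) - (l.count '0' : Int)) :
    pvLoopA i_nc l (l.count '0') i_nc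
      = (l.dropWhile (· == '0')).contains '0' := by
  induction l with
  | nil => rfl
  | cons c rest ih =>
    by_cases hc : c = '0'
    · subst hc
      have hcnt : ((('0' :: rest).count '0' : Int)) - 1 = (rest.count '0' : Int) := by
        simp
      have hlen : i_nc = (rest.length : Int) - (rest.count '0' : Int) := by
        simp [List.length_cons] at h
        omega
      have hdw : ('0' :: rest).dropWhile (· == '0') = rest.dropWhile (· == '0') :=
        List.dropWhile_cons_of_pos (by simp)
      simp only [pvLoopA, beq_self_eq_true, if_true, hcnt, hdw]
      by_cases h1 : (rest.count '0' : Int) = 0 ∧ 0 < i_nc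
      · have hr0 : rest.count '0' = 0 := by exact_mod_cast h1.1
        have hb : ((rest.count '0' : Int) == 0 && decide (i_nc > 0)) = true := by
          simp [h1.1, h1.2]
        rw [hb, if_pos rfl]
        exact (pv_contains_dropWhile_zero rest hr0).symm
      · have hb : ((rest.count '0' : Int) == 0 && decide (i_nc > 0)) = false := by
          by_contra hx
          simp only [Bool.not_eq_false, Bool.and_eq_true, beq_iff_eq,
            decide_eq_true_iff] at hx
          exact h1 hx
        have hb2 : (decide ((rest.count '0' : Int) > 0) && decide (i_nc < i_nc)) = false := by
          simp
        rw [hb, hb2]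
        simp only [Bool.false_eq_true, if_false]
        exact ih hlen
    · have hcb : (c == '0') = false := by simp [hc]
      have hcnt : ((c :: rest).count '0' : Int) = (rest.count '0' : Int) := by
        simp [List.count_cons, hcb]
      have hdw : (c :: rest).dropWhile (· == '0') = c :: rest :=
        List.dropWhile_cons_of_neg (by simp [hc])
      simp only [pvLoopA, hcb, Bool.false_eq_true, if_false, hcnt, hdw]
      by_cases h1 : (rest.count '0' : Int) = 0
      · have hr0 : rest.count '0' = 0 := by exact_mod_cast h1
        have hall : (c :: rest).count '0' = 0 := by simp [List.count_cons, hcb, hr0]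
        by_cases h2 : 0 < i_nc - 1
        · have hb : ((rest.count '0' : Int) == 0 && decide (i_nc - 1 > 0)) = true := by
            simp [h1]
            omega
          rw [hb, if_pos rfl]
          exact (pv_contains_false _ hall).symm
        · have hb : ((rest.count '0' : Int) == 0 && decide (i_nc - 1 > 0)) = false := by
            simp
            exact fun _ => by omega
          have hb2 : (decide ((rest.count '0' : Int) > 0) && decide (i_nc - 1 < i_nc)) = false := by
            simp [h1]
          rw [hb, hb2]
          simp only [Bool.false_eq_true, if_false]
          rw [h1, pvLoopA_no_zeros _ _ _ hr0]
          exact (pv_contains_false _ hall).symm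
      · have hp : 0 < (rest.count '0' : Int) := by
          have : 0 ≤ (rest.count '0' : Int) := Int.natCast_nonneg _
          omega
        have hb : ((rest.count '0' : Int) == 0 && decide (i_nc - 1 > 0)) = false := by
          simp
          exact fun hx => absurd hx (by omega)
        have hb2 : (decide ((rest.count '0' : Int) > 0) && decide (i_nc - 1 < i_nc)) = true := by
          rw [decide_eq_true hp, decide_eq_true (show i_nc - 1 < i_nc by omega)]
          rfl
        rw [hb, hb2]
        simp only [Bool.false_eq_true, if_false]
        have hcp : 0 < (c :: rest).count '0' := by
          have h' : 0 < rest.count '0' := by exact_mod_cast hp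
          simpa [List.count_cons, hcb] using h'
        exact (pv_contains_true _ hcp).symm

lemma pv_contains_reverse (l : List Char) :
    l.reverse.contains '0' = l.contains '0' := by
  simp [List.contains_eq_mem]

-- ===== VERDICT (by name: the statement is the Claim_ definition above) =====
theorem increaseNumberRoundness_spec : Claim_equal_increaseNumberRoundness := by
  intro n _
  unfold Spec_increaseNumberRoundness increaseNumberRoundness increaseNumberRoundness_alt
  set l := (PySem.Int.toStr n).toList.reverse with hl
  simp only
  rw [pv_contains_reverse]
  by_cases h0 : l.count '0' = 0
  · rw [if_pos (by simp [h0])]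
    exact (pv_contains_dropWhile_zero l h0).symm
  · rw [if_neg (by simpa using fun hx : (l.count '0' : Int) = 0 => h0 (by exact_mod_cast hx))]
    exact pvLoopA_phase1 l _ rfl
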